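-- pv_equiv track=rewrite | github.com/h-chamillard/PPOD_Assignement | Assignment_2_Fx/compartmentation_and_clustering.py | find_most_frequent_columns
-- ===== SOURCE A (Python) =====
-- def find_most_frequent_columns(unique_combinations):
--     frequency_dict = {}
--     for combination in unique_combinations:
--         for column in combination:
--             if column in frequency_dict:
--                 frequency_dict[column] += 1
--             else:
--                 frequency_dict[column] = 1
--
--     return frequency_dict
-- ===== SOURCE B (Python) =====
-- def find_most_frequent_columns(unique_combinations):
--     flat = [column for combination in unique_combinations for column in combination]
--     distinct = list(dict.fromkeys(flat))
--     return {column: flat.count(column) for column in distinct}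
-- ===== Notes on version B (the rewrite author's own statement) =====
-- stated objective: alternative
-- what changed: A counts in one accumulating pass over all columns updating a frequency dict; B first flattens, computes the distinct columns via dict.fromkeys, then builds the dict by counting each distinct column's occurrences with flat.count.
import Mathlib
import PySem

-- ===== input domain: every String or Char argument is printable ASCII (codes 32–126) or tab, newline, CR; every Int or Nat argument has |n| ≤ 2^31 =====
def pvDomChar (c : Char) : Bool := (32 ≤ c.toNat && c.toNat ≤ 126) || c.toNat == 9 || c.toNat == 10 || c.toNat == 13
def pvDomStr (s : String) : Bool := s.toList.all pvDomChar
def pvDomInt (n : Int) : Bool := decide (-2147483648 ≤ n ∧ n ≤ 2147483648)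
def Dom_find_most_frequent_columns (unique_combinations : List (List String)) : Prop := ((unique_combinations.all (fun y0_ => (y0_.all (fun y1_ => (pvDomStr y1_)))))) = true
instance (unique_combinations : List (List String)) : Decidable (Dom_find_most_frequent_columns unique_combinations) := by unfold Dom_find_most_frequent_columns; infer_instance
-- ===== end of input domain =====

-- B flattens once, dedups via dict.fromkeys, and counts each distinct column with flat.count — a different decomposition of the same frequency dict (alternative, not faster).


-- ===== PORT A =====
def find_most_frequent_columns (unique_combinations : List (List String)) : List (String × Int) :=
  (unique_combinations.foldl
    (fun frequency_dict combination =>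
      combination.foldl
        (fun frequency_dict column =>
          if frequency_dict.contains column then
            frequency_dict.insert column (frequency_dict.getD column 0 + 1)
          else
            frequency_dict.insert column 1)
        frequency_dict)
    (PySem.Dict.empty : PySem.Dict String Int)).items

-- ===== PORT B =====
def find_most_frequent_columns_alt (unique_combinations : List (List String)) : List (String × Int) :=
  let flat := unique_combinations.flatMap (fun combination => combination)
  let distinct := PySem.List.dedup flat
  (distinct.foldl
    (fun result column => result.insert column ((flat.count column : Int)))
    (PySem.Dict.empty : PySem.Dict String Int)).items

-- ===== PRECONDITION & SPEC =====
def Spec_find_most_frequent_columns (unique_combinations : List (List String)) (out : List (String × Int)) : Prop := out = find_most_frequent_columns_alt unique_combinations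
instance (unique_combinations : List (List String)) (out : List (String × Int)) : Decidable (Spec_find_most_frequent_columns unique_combinations out) := by unfold Spec_find_most_frequent_columns; infer_instance

-- ===== CLAIM (what is proved, stated in full; the proofs are below) =====
def Claim_equal_find_most_frequent_columns : Prop := ∀ (unique_combinations : List (List String)), Dom_find_most_frequent_columns unique_combinations → Spec_find_most_frequent_columns unique_combinations (find_most_frequent_columns unique_combinations)

-- ===== LEMMAS AND PROOFS =====

-- A's loop step is exactly the counter step: when the key is absent, getD returns 0.
lemma stepA_eq_counter_step (d : PySem.Dict String Int) (c : String) :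
    (if d.contains c then d.insert c (d.getD c 0 + 1) else d.insert c 1)
      = d.insert c (d.getD c 0 + 1) := by
  by_cases h : d.contains c
  · simp [h]
  · simp [eq_false_of_ne_true h, PySem.Dict.getD_of_not_contains d 0 (eq_false_of_ne_true h)]

-- A's nested fold is Counter(flattened input).
lemma portA_eq_counter (ucs : List (List String)) :
    (ucs.foldl
      (fun d comb => comb.foldl
        (fun d c => if d.contains c then d.insert c (d.getD c 0 + 1) else d.insert c 1) d)
      (PySem.Dict.empty : PySem.Dict String Int))
      = PySem.Dict.counter ucs.flatten := by
  have hstep : (fun (d : PySem.Dict String Int) (c : String) =>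
      if d.contains c then d.insert c (d.getD c 0 + 1) else d.insert c 1)
      = fun d c => d.insert c (d.getD c 0 + 1) := by
    funext d c; exact stepA_eq_counter_step d c
  rw [← List.foldl_flatten, hstep, PySem.Dict.foldl_insert_getD_add_one_eq_counter]

-- ===== VERDICT (by name: the statement is the Claim_ definition above) =====
theorem find_most_frequent_columns_spec : Claim_equal_find_most_frequent_columns := by
  intro ucs _
  unfold Spec_find_most_frequent_columns find_most_frequent_columns find_most_frequent_columns_alt
  rw [portA_eq_counter, PySem.Dict.items_counter]
  have hflat : ucs.flatMap (fun combination => combination) = ucs.flatten := by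
    simp [List.flatMap]
  rw [hflat]
  simp only [PySem.List.dedup_eq_ofList]
  rw [PySem.Dict.items_foldl_insert_fresh (PySem.Set.ofList ucs.flatten)
      (fun c => c) (fun c => ((ucs.flatten.count c : Int))) PySem.Dict.empty
      (by intro a _; rfl)
      (by simp [PySem.Set.nodup_ofList ucs.flatten])]
  simp [PySem.Dict.empty]
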